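/- GENERATED by c/gen_decode.py: decode facts of the image, one per distinct instruction byte string. -/
import UserX.DecodeImage

#decode_all ProgX.Base.Dec
  "0f8a72010000"  -- jp 102757
  "44886d00"  -- mov BYTE PTR [rbp+0x0],r13b
  "4883c701"  -- add rdi,0x1
  "4889d8"  -- mov rax,rbx
  "488d4703"  -- lea rax,[rdi+0x3]
  "4989ce"  -- mov r14,rcx
  "4c89e2"  -- mov rdx,r12
  "660f2ee0"  -- ucomisd xmm4,xmm0
  "72f1"  -- jb 100e68
  "7518"  -- jne 102abb
  "7e43"  -- jle 102257
  "8d83fe030000"  -- lea eax,[rbx+0x3fe]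
  "e806faffff"  -- call 101300
  "e89fd4ffff"  -- call 100cc0
  "e8f2090000"  -- call 104200
  "ebea"  -- jmp 101daa
  "f20f58059bd70300"  -- addsd xmm0,QWORD PTR [rip+0x3d79b]
  "f20f59c1"  -- mulsd xmm0,xmm1
  "f20f5e15ecdf0300"  -- divsd xmm2,QWORD PTR [rip+0x3dfec]
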